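-- pv_equiv track=rewrite | github.com/Mister-Teapot/OriC_Finder | oriC_Finder_v3.py | split_window
-- ===== SOURCE A (Python) =====
-- def split_window(window):
--     '''Splits a peak_window in two based on whether the indeces in the window are consecutive'''
--     in_a = True
--     a, b = [], []
--     for i, val in enumerate(window):
--         if i-1 > 0 and val != window[i-1] + 1:
--             in_a = False
--         a.append(val) if in_a else b.append(val)
--     return a, b
-- ===== SOURCE B (Python) =====
-- def split_window(window):
--     '''Splits a peak_window in two based on whether the indeces in the window are consecutive'''
--     split = len(window)
--     for i in range(2, len(window)):
--         if window[i] != window[i - 1] + 1: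
--             split = i
--             break
--     return window[:split], window[split:]
-- ===== Notes on version B (the rewrite author's own statement) =====
-- stated objective: simpler
-- what changed: Replaces the per-element flag-and-append loop with a locate-then-slice decomposition: find the first break index i >= 2 (default len(window)), then return the two slices.
import Mathlib
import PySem

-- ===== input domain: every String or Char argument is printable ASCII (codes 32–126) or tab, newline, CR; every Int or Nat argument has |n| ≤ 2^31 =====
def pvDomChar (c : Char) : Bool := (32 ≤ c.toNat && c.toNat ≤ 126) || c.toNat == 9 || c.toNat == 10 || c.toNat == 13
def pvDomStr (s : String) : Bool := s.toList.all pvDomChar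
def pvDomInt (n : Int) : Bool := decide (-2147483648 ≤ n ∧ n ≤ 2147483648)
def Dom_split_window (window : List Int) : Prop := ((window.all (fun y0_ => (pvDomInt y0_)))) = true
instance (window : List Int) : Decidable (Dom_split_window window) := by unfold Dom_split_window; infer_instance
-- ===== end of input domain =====

-- B replaces A's per-element flag-and-append loop with a locate-then-slice decomposition (objective: simpler).


-- ===== PORT A =====
-- the for-loop over enumerate(window) as structural recursion on the remaining suffix;
-- the Python guard `i-1 > 0` (ints) is written `2 ≤ i` (i : Nat); window[i-1] is only
-- evaluated by Python when 2 ≤ i, where i-1 is in range, so getD is exact there.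
def splitA_go (window : List Int) (i : Nat) (rest : List Int)
    (in_a : Bool) (a b : List Int) : List Int × List Int :=
  match rest with
  | [] => (a, b)
  | val :: rest' =>
    let in_a' := if 2 ≤ i ∧ val ≠ window.getD (i - 1) 0 + 1 then false else in_a
    if in_a' then splitA_go window (i + 1) rest' in_a' (a ++ [val]) b
    else splitA_go window (i + 1) rest' in_a' a (b ++ [val])

def split_window (window : List Int) : List Int × List Int :=
  splitA_go window 0 window true [] []

-- ===== PORT B =====
-- the `for i in range(2, len(window)) … break` search for the split index
def findSplit (window : List Int) (i : Nat) : Nat :=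
  if _h : i < window.length then
    if window.getD i 0 ≠ window.getD (i - 1) 0 + 1 then i
    else findSplit window (i + 1)
  else window.length
termination_by window.length - i

-- window[:split], window[split:] with 0 ≤ split ≤ len are exactly take/drop
def split_window_alt (window : List Int) : List Int × List Int :=
  let split := findSplit window 2
  (window.take split, window.drop split)

-- ===== PRECONDITION & SPEC =====
def Spec_split_window (window : List Int) (out : List Int × List Int) : Prop := out = split_window_alt window
instance (window : List Int) (out : List Int × List Int) : Decidable (Spec_split_window window out) := by unfold Spec_split_window; infer_instance

-- ===== CLAIM (what is proved, stated in full; the proofs are below) =====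
def Claim_equal_split_window : Prop := ∀ (window : List Int), Dom_split_window window → Spec_split_window window (split_window window)

-- ===== LEMMAS AND PROOFS =====

theorem findSplit_eq (window : List Int) (i : Nat) :
    findSplit window i =
      if i < window.length then
        (if window.getD i 0 ≠ window.getD (i - 1) 0 + 1 then i else findSplit window (i + 1))
      else window.length := by
  conv_lhs => rw [findSplit]
  split_ifs <;> simp_all

theorem findSplit_ge (window : List Int) (i : Nat) (h : i ≤ window.length) :
    i ≤ findSplit window i := by
  rw [findSplit_eq]
  split_ifs with h1 h2
  · exact le_refl _
  · exact Nat.le_of_succ_le (findSplit_ge window (i + 1) h1)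
  · omega
termination_by window.length - i
decreasing_by omega

theorem splitA_go_false (window : List Int) (i : Nat) (rest : List Int) (a b : List Int) :
    splitA_go window i rest false a b = (a, b ++ rest) := by
  induction rest generalizing i b with
  | nil => simp [splitA_go]
  | cons v r ih =>
    simp only [splitA_go, ite_self]
    simp [ih]

theorem splitA_go_true (window : List Int) (i : Nat) (hi : 2 ≤ i) (a b : List Int) :
    splitA_go window i (window.drop i) true a b =
      (a ++ (window.drop i).take (findSplit window i - i),
       b ++ (window.drop i).drop (findSplit window i - i)) := by
  by_cases h : i < window.length
  · have hdrop : window.drop i = window[i] :: window.drop (i + 1) :=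
      (List.getElem_cons_drop h).symm
    have hgd : window.getD i 0 = window[i] := by
      simp [List.getD_eq_getElem?_getD, List.getElem?_eq_getElem h]
    by_cases hb : window[i] ≠ window.getD (i - 1) 0 + 1
    · -- break at i: everything from i onwards goes to b
      have hk : findSplit window i = i := by
        rw [findSplit_eq, if_pos h, if_pos (by rw [hgd]; exact hb)]
      have hcond : (if 2 ≤ i ∧ window[i] ≠ window.getD (i - 1) 0 + 1 then false else true) = false :=
        if_pos ⟨hi, hb⟩
      rw [hdrop]
      simp only [splitA_go, hcond]
      rw [if_neg (by simp), splitA_go_false, hk]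
      simp [← hdrop]
    · -- no break at i: window[i] goes to a, recurse
      rw [not_not] at hb
      have hk : findSplit window i = findSplit window (i + 1) := by
        rw [findSplit_eq, if_pos h, if_neg (by rw [hgd]; simpa using hb)]
      have hge : i + 1 ≤ findSplit window (i + 1) := findSplit_ge window (i + 1) (by omega)
      have hcond : (if 2 ≤ i ∧ window[i] ≠ window.getD (i - 1) 0 + 1 then false else true) = true := by
        rw [if_neg]; rintro ⟨_, hne⟩; exact hne hb
      rw [hdrop]
      simp only [splitA_go, hcond]
      rw [if_pos trivial, splitA_go_true window (i + 1) (by omega) (a ++ [window[i]]) b]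
      rw [hk]
      have h1 : findSplit window (i + 1) - i = (findSplit window (i + 1) - (i + 1)) + 1 := by
        omega
      rw [h1]
      simp only [List.take_succ_cons, List.drop_succ_cons, List.append_assoc,
        List.singleton_append]
  · have hdrop : window.drop i = [] := List.drop_eq_nil_of_le (by omega)
    have hk : findSplit window i = window.length := by
      rw [findSplit_eq, if_neg h]
    simp [hdrop, splitA_go, hk]
termination_by window.length - i
decreasing_by omega

-- ===== VERDICT (by name: the statement is the Claim_ definition above) =====
theorem split_window_spec : Claim_equal_split_window := by
  intro window _
  unfold Spec_split_window split_window split_window_alt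
  match window with
  | [] => simp [splitA_go, findSplit_eq]
  | [v] =>
    have h1 : findSplit [v] 2 = 1 := by rw [findSplit_eq]; simp
    simp [splitA_go, h1]
  | v0 :: v1 :: rest =>
    have hstep : splitA_go (v0 :: v1 :: rest) 0 (v0 :: v1 :: rest) true [] []
        = splitA_go (v0 :: v1 :: rest) 2 rest true [v0, v1] [] := by
      simp [splitA_go]
    have hge : 2 ≤ findSplit (v0 :: v1 :: rest) 2 :=
      findSplit_ge _ 2 (by simp)
    obtain ⟨m, hm⟩ : ∃ m, findSplit (v0 :: v1 :: rest) 2 = m + 2 := ⟨findSplit (v0 :: v1 :: rest) 2 - 2, by omega⟩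
    have hmain := splitA_go_true (v0 :: v1 :: rest) 2 (by omega) [v0, v1] []
    have hdrop2 : (v0 :: v1 :: rest).drop 2 = rest := rfl
    rw [hdrop2] at hmain
    rw [hstep, hmain, hm]
    simp [List.take_succ_cons, List.drop_succ_cons]
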